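-- pv_equiv track=rewrite | github.com/ConnorBaker/blender-temp | blender_temp/gaussian_sr/benchmarking.py | select_compare_views
-- ===== SOURCE A (Python) =====
-- def select_compare_views(num_views: int) -> tuple[int, ...]:
--     if num_views <= 0:
--         return ()
--     candidates = (0, num_views // 2, num_views - 1)
--     ordered: list[int] = []
--     seen: set[int] = set()
--     for raw_idx in candidates:
--         idx = max(0, min(int(raw_idx), num_views - 1))
--         if idx not in seen:
--             ordered.append(idx)
--             seen.add(idx)
--     return tuple(ordered)
-- ===== SOURCE B (Python) =====
-- def select_compare_views(num_views: int) -> tuple[int, ...]: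
--     if num_views <= 0:
--         return ()
--     if num_views == 1:
--         return (0,)
--     if num_views == 2:
--         return (0, 1)
--     return (0, num_views // 2, num_views - 1)
-- ===== Notes on version B (the rewrite author's own statement) =====
-- stated objective: simpler
-- what changed: Replaces the clamp-and-dedup loop with a seen-set by a closed-form case analysis on num_views (the three candidate indices are always in range, and distinct exactly when num_views >= 3).
import Mathlib
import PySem

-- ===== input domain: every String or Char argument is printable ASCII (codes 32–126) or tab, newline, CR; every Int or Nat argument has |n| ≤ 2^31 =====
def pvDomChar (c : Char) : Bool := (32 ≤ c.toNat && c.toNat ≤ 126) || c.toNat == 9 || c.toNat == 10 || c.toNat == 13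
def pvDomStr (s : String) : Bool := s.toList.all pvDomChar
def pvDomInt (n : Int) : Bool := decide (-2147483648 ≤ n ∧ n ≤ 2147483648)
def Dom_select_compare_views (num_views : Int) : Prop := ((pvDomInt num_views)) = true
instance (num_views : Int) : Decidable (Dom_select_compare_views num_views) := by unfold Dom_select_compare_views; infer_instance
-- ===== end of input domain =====

-- ===== PORT A =====
-- B replaces the clamp-and-dedup loop by a closed-form case analysis on num_views (objective: simpler).
def select_compare_views (num_views : Int) : List Int :=
  if num_views ≤ 0 then []
  else
    let candidates : List Int := [0, PySem.Int.floordiv num_views 2, num_views - 1]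
    let st := candidates.foldl
      (fun (st : List Int × PySem.Set Int) raw_idx =>
        let idx := max 0 (min raw_idx (num_views - 1))
        if idx ∈ st.2 then st else (st.1 ++ [idx], st.2.add idx))
      ([], PySem.Set.empty)
    st.1

-- ===== PORT B =====
def select_compare_views_alt (num_views : Int) : List Int :=
  if num_views ≤ 0 then []
  else if num_views = 1 then [0]
  else if num_views = 2 then [0, 1]
  else [0, PySem.Int.floordiv num_views 2, num_views - 1]

-- ===== PRECONDITION & SPEC =====
def Spec_select_compare_views (num_views : Int) (out : List Int) : Prop := out = select_compare_views_alt num_views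
instance (num_views : Int) (out : List Int) : Decidable (Spec_select_compare_views num_views out) := by unfold Spec_select_compare_views; infer_instance

-- ===== CLAIM (what is proved, stated in full; the proofs are below) =====
def Claim_equal_select_compare_views : Prop := ∀ (num_views : Int), Dom_select_compare_views num_views → Spec_select_compare_views num_views (select_compare_views num_views)

-- ===== LEMMAS AND PROOFS =====

-- ===== VERDICT (by name: the statement is the Claim_ definition above) =====
theorem select_compare_views_spec : Claim_equal_select_compare_views := by
  intro n _
  unfold Spec_select_compare_views select_compare_views select_compare_views_alt
  by_cases h0 : n ≤ 0
  · simp [h0]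
  · rcases (show n = 1 ∨ n = 2 ∨ 3 ≤ n by omega) with h | h | h
    · subst h; decide
    · subst h; decide
    · have hne1 : n ≠ 1 := by omega
      have hne2 : n ≠ 2 := by omega
      rw [PySem.Int.floordiv_eq_ediv_of_pos (by norm_num)]
      have hfd1 : 1 ≤ n / 2 := by omega
      have hfd2 : n / 2 ≤ n - 2 := by omega
      simp only [if_neg h0, if_neg hne1, if_neg hne2, List.foldl, PySem.Set.empty,
        PySem.Set.add]
      have hmin0 : max 0 (min 0 (n - 1)) = 0 := by omega
      have hmin1 : max 0 (min (n / 2) (n - 1)) = n / 2 := by omega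
      have hmin2 : max 0 (min (n - 1) (n - 1)) = n - 1 := by omega
      rw [hmin0, hmin1, hmin2]
      simp [show n / 2 ≠ 0 from by omega, show n - 1 ≠ 0 from by omega,
            show n - 1 ≠ n / 2 from by omega]
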